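-- pv_equiv track=rewrite | github.com/jeongjinmyung/coding_test | 백준/Silver/16953. A → B/A → B.py | a_to_b
-- ===== SOURCE A (Python) =====
-- def a_to_b(a, b):
--     operations = 0
--     while b > a:
--         if b % 2 == 0:
--             b //= 2
--         elif b % 10 == 1:
--             b //= 10
--         else:
--             return -1
--
--         operations += 1
--
--     return operations + 1 if b == a else -1
-- ===== SOURCE B (Python) =====
-- def a_to_b(a, b):
--     # Forward search from a toward b: double or append digit 1, pruning any
--     # candidate that does not strictly grow or that overshoots b.  Because a
--     # backward step from any value is uniquely determined (even -> came from
--     # doubling, ends in 1 -> came from appending), at most one branch can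
--     # succeed, so this depth-first search returns the unique node count.
--     def depth(v):
--         if v == b:
--             return 1
--         d = depth(v * 2) if v < v * 2 <= b else -1
--         if d == -1:
--             d = depth(v * 10 + 1) if v < v * 10 + 1 <= b else -1
--         return -1 if d == -1 else d + 1
--     return depth(a)
-- ===== Notes on version B (the rewrite author's own statement) =====
-- stated objective: idiomatic
-- what changed: A greedily walks backward from b (halve if even, strip a trailing 1) counting steps; B searches forward from a (double, or append digit 1) by recursion with pruning, the idiomatic solution to this problem, relying on the fact that the reverse step is deterministic so the forward path is unique.
-- outside the precondition, e.g. on a_to_b(-1, 5): A returns -1, B returns -1; on a_to_b(-2, 7): A returns -1, B returns -1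
import Mathlib
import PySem

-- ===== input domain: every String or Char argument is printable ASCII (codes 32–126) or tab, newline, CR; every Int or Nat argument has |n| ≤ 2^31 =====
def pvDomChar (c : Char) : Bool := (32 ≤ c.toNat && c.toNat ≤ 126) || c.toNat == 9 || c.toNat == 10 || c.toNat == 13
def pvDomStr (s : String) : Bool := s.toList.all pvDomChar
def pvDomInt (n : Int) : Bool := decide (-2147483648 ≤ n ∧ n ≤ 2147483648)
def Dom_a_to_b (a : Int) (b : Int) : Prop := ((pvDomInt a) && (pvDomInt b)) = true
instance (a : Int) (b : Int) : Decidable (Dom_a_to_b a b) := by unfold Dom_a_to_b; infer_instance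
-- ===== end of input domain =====

-- B replaces A's backward greedy walk from b by the idiomatic forward search from a
-- (double or append digit 1, pruned to strictly growing values ≤ b); same cost, not faster.

-- ===== PORT A =====
-- A's while-loop; the fuel is only a totality guard: under Pre_a_to_b the loop
-- takes at most b.natAbs steps (|b| strictly decreases), so fuel never runs out.
def aLoop (a : Int) : Nat → Int → Int → Int
  | 0, _, _ => -1
  | f + 1, b, ops =>
    if b > a then
      if PySem.Int.mod b 2 = 0 then aLoop a f (PySem.Int.floordiv b 2) (ops + 1)
      else if PySem.Int.mod b 10 = 1 then aLoop a f (PySem.Int.floordiv b 10) (ops + 1)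
      else -1
    else if b = a then ops + 1 else -1

def a_to_b (a : Int) (b : Int) : Int := aLoop a (b.natAbs + 1) b 0

-- ===== PORT B =====
-- Source B's recursive depth(v): node count of the unique forward path v -> b, or -1.
-- The fuel is only a totality guard: each recursive call strictly decreases
-- (b - v).toNat (the guard forces v < child ≤ b), so the starting fuel never runs out.
def bDepth (b : Int) : Nat → Int → Int
  | 0, _ => -1
  | f + 1, v =>
    if v = b then 1
    else
      let d1 := if v < v * 2 ∧ v * 2 ≤ b then bDepth b f (v * 2) else -1
      let d := if d1 = -1 then
                 (if v < v * 10 + 1 ∧ v * 10 + 1 ≤ b then bDepth b f (v * 10 + 1) else -1)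
               else d1
      if d = -1 then -1 else d + 1

def a_to_b_alt (a : Int) (b : Int) : Int := bDepth b ((b - a).toNat + 1) a

-- ===== PRECONDITION & SPEC =====
-- Pre_ excludes the quadrant a < 0 ≤ b: there A DIVERGES whenever repeated
-- halving / stripping of a trailing 1 drives b to 0 (e.g. a = -1, b = 2), and that
-- divergence set has no closed form; on the rest of the quadrant A and B both return -1.
def Pre_a_to_b (a : Int) (b : Int) : Prop := 0 ≤ a ∨ b < 0
instance (a : Int) (b : Int) : Decidable (Pre_a_to_b a b) := by unfold Pre_a_to_b; infer_instance
def pvWitness_a_to_b : Int × Int := (2, 162)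

def Spec_a_to_b (a : Int) (b : Int) (out : Int) : Prop := out = a_to_b_alt a b
instance (a : Int) (b : Int) (out : Int) : Decidable (Spec_a_to_b a b out) := by unfold Spec_a_to_b; infer_instance

-- ===== CLAIM (what is proved, stated in full; the proofs are below) =====
def Claim_equal_a_to_b : Prop := ∀ (a : Int) (b : Int), Dom_a_to_b a b → Pre_a_to_b a b → Spec_a_to_b a b (a_to_b a b)

-- ===== LEMMAS AND PROOFS =====

-- bDepth with its canonical (always sufficient) fuel
def Bd (b v : Int) : Int := bDepth b ((b - v).toNat + 1) v

-- backward parent of b (the unique predecessor of b under the two forward moves)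
def parB (b : Int) : Option Int :=
  if b % 2 = 0 then some (b / 2) else if b % 10 = 1 then some (b / 10) else none

def bump (d : Int) : Int := if d = -1 then -1 else d + 1

-- how bDepth combines the two child results
def comb (d1 d2 : Int) : Int :=
  if (if d1 = -1 then d2 else d1) = -1 then -1 else (if d1 = -1 then d2 else d1) + 1

theorem bDepth_succ (b v : Int) (f : Nat) (hv : v ≠ b) :
    bDepth b (f + 1) v = comb (if v < v * 2 ∧ v * 2 ≤ b then bDepth b f (v * 2) else -1)
                              (if v < v * 10 + 1 ∧ v * 10 + 1 ≤ b then bDepth b f (v * 10 + 1) else -1) := by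
  rw [bDepth, if_neg hv]
  rfl

theorem bDepth_self (b : Int) (f : Nat) : bDepth b (f + 1) b = 1 := by
  rw [bDepth, if_pos rfl]

theorem Bd_self (b : Int) : Bd b b = 1 := bDepth_self b ((b - b).toNat)

theorem bDepth_gt (b : Int) (f : Nat) (v : Int) (h : b < v) : bDepth b f v = -1 := by
  cases f with
  | zero => rw [bDepth]
  | succ f =>
    rw [bDepth_succ b v f (by omega), if_neg (by omega), if_neg (by omega)]
    rfl

theorem Bd_gt (b v : Int) (h : b < v) : Bd b v = -1 := bDepth_gt b _ v h

theorem comb_pos (d1 d2 : Int) (h1 : d1 = -1 ∨ 1 ≤ d1) (h2 : d2 = -1 ∨ 1 ≤ d2) :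
    comb d1 d2 = -1 ∨ 1 ≤ comb d1 d2 := by
  unfold comb; split_ifs <;> omega

theorem comb_bump (d1 d2 : Int) (h1 : d1 = -1 ∨ 1 ≤ d1) (h2 : d2 = -1 ∨ 1 ≤ d2) :
    comb (bump d1) (bump d2) = bump (comb d1 d2) := by
  unfold comb bump; split_ifs <;> omega

theorem bDepth_pos (b : Int) : ∀ (f : Nat) (v : Int), bDepth b f v = -1 ∨ 1 ≤ bDepth b f v := by
  intro f
  induction f with
  | zero => intro v; left; rw [bDepth]
  | succ f ih =>
    intro v
    by_cases hv : v = b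
    · rw [hv, bDepth_self]; omega
    · rw [bDepth_succ b v f hv]
      apply comb_pos
      · by_cases h1 : v < v * 2 ∧ v * 2 ≤ b
        · rw [if_pos h1]; exact ih (v * 2)
        · rw [if_neg h1]; left; rfl
      · by_cases h2 : v < v * 10 + 1 ∧ v * 10 + 1 ≤ b
        · rw [if_pos h2]; exact ih (v * 10 + 1)
        · rw [if_neg h2]; left; rfl

theorem Bd_pos (b v : Int) : Bd b v = -1 ∨ 1 ≤ Bd b v := bDepth_pos b _ v

-- the result does not depend on the fuel, as long as the fuel is sufficient
theorem bDepth_fuel (b : Int) : ∀ (n : Nat) (f f' : Nat) (v : Int), (b - v).toNat ≤ n →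
    (b - v).toNat < f → (b - v).toNat < f' → bDepth b f v = bDepth b f' v := by
  intro n
  induction n with
  | zero =>
    intro f f' v hn hf hf'
    obtain ⟨g, rfl⟩ : ∃ g, f = g + 1 := ⟨f - 1, by omega⟩
    obtain ⟨g', rfl⟩ : ∃ g', f' = g' + 1 := ⟨f' - 1, by omega⟩
    by_cases hv : v = b
    · rw [hv, bDepth_self, bDepth_self]
    · rw [bDepth_succ b v g hv, bDepth_succ b v g' hv,
          if_neg (by omega : ¬ (v < v * 2 ∧ v * 2 ≤ b)),
          if_neg (by omega : ¬ (v < v * 10 + 1 ∧ v * 10 + 1 ≤ b))]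
      rw [if_neg (by omega : ¬ (v < v * 2 ∧ v * 2 ≤ b)),
          if_neg (by omega : ¬ (v < v * 10 + 1 ∧ v * 10 + 1 ≤ b))]
  | succ n ih =>
    intro f f' v hn hf hf'
    obtain ⟨g, rfl⟩ : ∃ g, f = g + 1 := ⟨f - 1, by omega⟩
    obtain ⟨g', rfl⟩ : ∃ g', f' = g' + 1 := ⟨f' - 1, by omega⟩
    by_cases hv : v = b
    · rw [hv, bDepth_self, bDepth_self]
    · rw [bDepth_succ b v g hv, bDepth_succ b v g' hv]
      have c1 : (if v < v * 2 ∧ v * 2 ≤ b then bDepth b g (v * 2) else -1)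
          = (if v < v * 2 ∧ v * 2 ≤ b then bDepth b g' (v * 2) else -1) := by
        by_cases h1 : v < v * 2 ∧ v * 2 ≤ b
        · rw [if_pos h1, if_pos h1]; exact ih g g' (v * 2) (by omega) (by omega) (by omega)
        · rw [if_neg h1, if_neg h1]
      have c2 : (if v < v * 10 + 1 ∧ v * 10 + 1 ≤ b then bDepth b g (v * 10 + 1) else -1)
          = (if v < v * 10 + 1 ∧ v * 10 + 1 ≤ b then bDepth b g' (v * 10 + 1) else -1) := by
        by_cases h2 : v < v * 10 + 1 ∧ v * 10 + 1 ≤ b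
        · rw [if_pos h2, if_pos h2]; exact ih g g' (v * 10 + 1) (by omega) (by omega) (by omega)
        · rw [if_neg h2, if_neg h2]
      rw [c1, c2]

theorem bDepth_canon (b : Int) (f : Nat) (v : Int) (hf : (b - v).toNat < f) :
    bDepth b f v = Bd b v :=
  bDepth_fuel b (b - v).toNat f ((b - v).toNat + 1) v le_rfl hf (by omega)

-- one unfolding of Bd, with the children again in canonical form
theorem Bd_eq (b v : Int) (hv : v ≠ b) :
    Bd b v = comb (if v < v * 2 ∧ v * 2 ≤ b then Bd b (v * 2) else -1)
                  (if v < v * 10 + 1 ∧ v * 10 + 1 ≤ b then Bd b (v * 10 + 1) else -1) := by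
  unfold Bd
  rw [bDepth_succ b v ((b - v).toNat) hv]
  have c1 : (if v < v * 2 ∧ v * 2 ≤ b then bDepth b ((b - v).toNat) (v * 2) else -1)
      = (if v < v * 2 ∧ v * 2 ≤ b then bDepth b ((b - v * 2).toNat + 1) (v * 2) else -1) := by
    by_cases h1 : v < v * 2 ∧ v * 2 ≤ b
    · rw [if_pos h1, if_pos h1, bDepth_canon b ((b - v).toNat) (v * 2) (by omega)]
      rfl
    · rw [if_neg h1, if_neg h1]
  have c2 : (if v < v * 10 + 1 ∧ v * 10 + 1 ≤ b then bDepth b ((b - v).toNat) (v * 10 + 1) else -1)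
      = (if v < v * 10 + 1 ∧ v * 10 + 1 ≤ b then bDepth b ((b - (v * 10 + 1)).toNat + 1) (v * 10 + 1) else -1) := by
    by_cases h2 : v < v * 10 + 1 ∧ v * 10 + 1 ≤ b
    · rw [if_pos h2, if_pos h2, bDepth_canon b ((b - v).toNat) (v * 10 + 1) (by omega)]
      rfl
    · rw [if_neg h2, if_neg h2]
  rw [c1, c2]

-- MAIN: the forward depth decomposes through b's unique backward parent
theorem Bd_par (b : Int) (hb : 1 ≤ b) :
    ∀ (n : Nat) (v : Int), (b - v).toNat ≤ n → v < b →
      Bd b v = (match parB b with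
                | none => -1
                | some p => bump (Bd p v)) := by
  intro n
  induction n with
  | zero => intro v hle hv; omega
  | succ n ih =>
    intro v hle hv
    have hvb : v ≠ b := by omega
    rcases hpar : parB b with _ | p
    · -- b is stuck: odd and not ending in 1
      have hm2 : ¬ b % 2 = 0 := by
        intro h; unfold parB at hpar; rw [if_pos h] at hpar; simp at hpar
      have hm10 : ¬ b % 10 = 1 := by
        intro h; unfold parB at hpar; rw [if_neg hm2, if_pos h] at hpar
        simp at hpar
      have c1 : (if v < v * 2 ∧ v * 2 ≤ b then Bd b (v * 2) else -1) = -1 := by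
        by_cases h1 : v < v * 2 ∧ v * 2 ≤ b
        · rw [if_pos h1]
          have hne : v * 2 ≠ b := by intro he; apply hm2; omega
          have := ih (v * 2) (by omega) (by omega)
          rw [hpar] at this; exact this
        · rw [if_neg h1]
      have c2 : (if v < v * 10 + 1 ∧ v * 10 + 1 ≤ b then Bd b (v * 10 + 1) else -1) = -1 := by
        by_cases h2 : v < v * 10 + 1 ∧ v * 10 + 1 ≤ b
        · rw [if_pos h2]
          have hne : v * 10 + 1 ≠ b := by intro he; apply hm10; omega
          have := ih (v * 10 + 1) (by omega) (by omega)
          rw [hpar] at this; exact this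
        · rw [if_neg h2]
      rw [Bd_eq b v hvb, c1, c2]
      rfl
    · -- b has a unique parent p
      have hpb : p < b ∧ 0 ≤ p ∧ (b = 2 * p ∨ b = 10 * p + 1) := by
        unfold parB at hpar
        by_cases hm2 : b % 2 = 0
        · rw [if_pos hm2] at hpar
          have : b / 2 = p := Option.some.inj hpar
          omega
        · rw [if_neg hm2] at hpar
          by_cases hm10 : b % 10 = 1
          · rw [if_pos hm10] at hpar
            have : b / 10 = p := Option.some.inj hpar
            omega
          · rw [if_neg hm10] at hpar; simp at hpar
      by_cases hvp : v = p
      · -- v is the parent itself: exactly one forward move reaches b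
        subst hvp
        have hrhs : bump (Bd v v) = 2 := by rw [Bd_self]; rfl
        dsimp only
        rw [hrhs, Bd_eq b v hvb]
        rcases hpb.2.2 with hbe | hbo
        · -- b = 2v : first branch fires with value 1
          have hg1 : v < v * 2 ∧ v * 2 ≤ b := by omega
          have hc1 : Bd b (v * 2) = 1 := by
            have hvv : v * 2 = b := by omega
            rw [hvv, Bd_self]
          rw [if_pos hg1, hc1]
          unfold comb
          norm_num
        · -- b = 10v + 1 : first branch dies, second fires with value 1
          have c1 : (if v < v * 2 ∧ v * 2 ≤ b then Bd b (v * 2) else -1) = -1 := by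
            by_cases h1 : v < v * 2 ∧ v * 2 ≤ b
            · rw [if_pos h1]
              have hlt : v * 2 < b := by omega
              have := ih (v * 2) (by omega) hlt
              rw [hpar] at this
              dsimp only at this
              rw [this, Bd_gt v (v * 2) (by omega)]
              rfl
            · rw [if_neg h1]
          have hg2 : v < v * 10 + 1 ∧ v * 10 + 1 ≤ b := by
            constructor <;> omega
          have hc2 : Bd b (v * 10 + 1) = 1 := by
            have hvv : v * 10 + 1 = b := by omega
            rw [hvv, Bd_self]
          rw [c1, if_pos hg2, hc2]
          unfold comb
          norm_num
      · -- generic step: the two sides branch in lockstep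
        have key : ∀ c : Int, c ≠ b →
            (if v < c ∧ c ≤ b then Bd b c else -1)
              = bump (if v < c ∧ c ≤ p then Bd p c else -1) := by
          intro c hcb
          by_cases hvc : v < c
          · by_cases hcp : c ≤ p
            · have hg : v < c ∧ c ≤ b := ⟨hvc, by omega⟩
              have hg' : v < c ∧ c ≤ p := ⟨hvc, hcp⟩
              have hlt : c < b := by omega
              have := ih c (by omega) hlt
              rw [hpar] at this
              dsimp only at this
              rw [if_pos hg, if_pos hg', this]
            · by_cases hcbb : c ≤ b
              · have hg : v < c ∧ c ≤ b := ⟨hvc, hcbb⟩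
                have hlt : c < b := by omega
                have := ih c (by omega) hlt
                rw [hpar] at this
                dsimp only at this
                rw [if_pos hg, if_neg (by omega : ¬ (v < c ∧ c ≤ p)), this,
                    Bd_gt p c (by omega)]
              · rw [if_neg (by omega : ¬ (v < c ∧ c ≤ b)),
                    if_neg (by omega : ¬ (v < c ∧ c ≤ p))]
                rfl
          · rw [if_neg (by omega : ¬ (v < c ∧ c ≤ b)),
                if_neg (by omega : ¬ (v < c ∧ c ≤ p))]
            rfl
        have hne2 : v * 2 ≠ b := by
          intro he; rcases hpb.2.2 with hbe | hbo
          · exact hvp (by omega)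
          · omega
        have hne10 : v * 10 + 1 ≠ b := by
          intro he; rcases hpb.2.2 with hbe | hbo
          · omega
          · exact hvp (by omega)
        have e1pos : (if v < v * 2 ∧ v * 2 ≤ p then Bd p (v * 2) else -1) = -1 ∨
            1 ≤ (if v < v * 2 ∧ v * 2 ≤ p then Bd p (v * 2) else -1) := by
          by_cases h : v < v * 2 ∧ v * 2 ≤ p
          · rw [if_pos h]; exact Bd_pos p (v * 2)
          · rw [if_neg h]; left; rfl
        have e2pos : (if v < v * 10 + 1 ∧ v * 10 + 1 ≤ p then Bd p (v * 10 + 1) else -1) = -1 ∨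
            1 ≤ (if v < v * 10 + 1 ∧ v * 10 + 1 ≤ p then Bd p (v * 10 + 1) else -1) := by
          by_cases h : v < v * 10 + 1 ∧ v * 10 + 1 ≤ p
          · rw [if_pos h]; exact Bd_pos p (v * 10 + 1)
          · rw [if_neg h]; left; rfl
        dsimp only
        rw [Bd_eq b v hvb, key (v * 2) hne2, key (v * 10 + 1) hne10,
            comb_bump _ _ e1pos e2pos, Bd_eq p v hvp]

-- A's loop on a negative target: the value climbs toward -1 and the loop always fails
theorem aLoop_neg (a : Int) :
    ∀ (f : Nat) (b ops : Int), a < b → b < 0 → b.natAbs < f → aLoop a f b ops = -1 := by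
  intro f
  induction f with
  | zero => intro b ops _ _ h; omega
  | succ f ih =>
    intro b ops hab hb hf
    rw [aLoop]
    have hm2e : PySem.Int.mod b 2 = b % 2 := PySem.Int.mod_eq_emod_of_pos (by norm_num)
    have hm10e : PySem.Int.mod b 10 = b % 10 := PySem.Int.mod_eq_emod_of_pos (by norm_num)
    have hd2e : PySem.Int.floordiv b 2 = b / 2 := PySem.Int.floordiv_eq_ediv_of_pos (by norm_num)
    have hd10e : PySem.Int.floordiv b 10 = b / 10 := PySem.Int.floordiv_eq_ediv_of_pos (by norm_num)
    rw [if_pos (by omega : b > a), hm2e, hm10e, hd2e, hd10e]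
    by_cases hm2 : b % 2 = 0
    · rw [if_pos hm2]
      exact ih (b / 2) (ops + 1) (by omega) (by omega) (by omega)
    · rw [if_neg hm2]
      by_cases hm10 : b % 10 = 1
      · rw [if_pos hm10]
        exact ih (b / 10) (ops + 1) (by omega) (by omega) (by omega)
      · rw [if_neg hm10]

-- A's loop on 0 ≤ a < b computes ops + (forward depth), or -1
theorem aLoop_pos (a : Int) (ha : 0 ≤ a) :
    ∀ (f : Nat) (b ops : Int), a < b → b.natAbs < f →
      aLoop a f b ops = (if Bd b a = -1 then -1 else ops + Bd b a) := by
  intro f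
  induction f with
  | zero => intro b ops _ h; omega
  | succ f ih =>
    intro b ops hab hf
    have hb1 : 1 ≤ b := by omega
    have hmain := Bd_par b hb1 (b - a).toNat a le_rfl hab
    rw [aLoop]
    have hm2e : PySem.Int.mod b 2 = b % 2 := PySem.Int.mod_eq_emod_of_pos (by norm_num)
    have hm10e : PySem.Int.mod b 10 = b % 10 := PySem.Int.mod_eq_emod_of_pos (by norm_num)
    have hd2e : PySem.Int.floordiv b 2 = b / 2 := PySem.Int.floordiv_eq_ediv_of_pos (by norm_num)
    have hd10e : PySem.Int.floordiv b 10 = b / 10 := PySem.Int.floordiv_eq_ediv_of_pos (by norm_num)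
    rw [if_pos (by omega : b > a), hm2e, hm10e, hd2e, hd10e]
    by_cases hm2 : b % 2 = 0
    · rw [if_pos hm2]
      have hp : parB b = some (b / 2) := by unfold parB; rw [if_pos hm2]
      rw [hp] at hmain
      dsimp only at hmain
      set p := b / 2 with hpd
      have hpb : 0 ≤ p ∧ p < b ∧ b = 2 * p := by omega
      by_cases hap : a < p
      · rw [ih p (ops + 1) hap (by omega), hmain]
        rcases Bd_pos p a with h | h
        · rw [h]
          have hbneg : bump (-1) = -1 := rfl
          rw [hbneg, if_pos rfl, if_pos rfl]
        · have hne : Bd p a ≠ -1 := by omega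
          have hbv : bump (Bd p a) = Bd p a + 1 := by unfold bump; rw [if_neg hne]
          rw [hbv, if_neg hne, if_neg (by omega)]
          omega
      · obtain ⟨f', rfl⟩ : ∃ f', f = f' + 1 := ⟨f - 1, by omega⟩
        rw [aLoop, if_neg (by omega : ¬ p > a)]
        rw [hmain]
        by_cases hpa : p = a
        · have h1 : Bd p a = 1 := by rw [hpa, Bd_self]
          rw [if_pos hpa, h1]
          have hb2 : bump 1 = 2 := rfl
          rw [hb2, if_neg (by norm_num)]
          omega
        · have h1 : Bd p a = -1 := Bd_gt p a (by omega)
          rw [if_neg hpa, h1]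
          have hbneg : bump (-1) = -1 := rfl
          rw [hbneg, if_pos rfl]
    · rw [if_neg hm2]
      by_cases hm10 : b % 10 = 1
      · rw [if_pos hm10]
        have hp : parB b = some (b / 10) := by unfold parB; rw [if_neg hm2, if_pos hm10]
        rw [hp] at hmain
        dsimp only at hmain
        set p := b / 10 with hpd
        have hpb : 0 ≤ p ∧ p < b ∧ b = 10 * p + 1 := by omega
        by_cases hap : a < p
        · rw [ih p (ops + 1) hap (by omega), hmain]
          rcases Bd_pos p a with h | h
          · rw [h]
            have hbneg : bump (-1) = -1 := rfl
            rw [hbneg, if_pos rfl, if_pos rfl]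
          · have hne : Bd p a ≠ -1 := by omega
            have hbv : bump (Bd p a) = Bd p a + 1 := by unfold bump; rw [if_neg hne]
            rw [hbv, if_neg hne, if_neg (by omega)]
            omega
        · obtain ⟨f', rfl⟩ : ∃ f', f = f' + 1 := ⟨f - 1, by omega⟩
          rw [aLoop, if_neg (by omega : ¬ p > a)]
          rw [hmain]
          by_cases hpa : p = a
          · have h1 : Bd p a = 1 := by rw [hpa, Bd_self]
            rw [if_pos hpa, h1]
            have hb2 : bump 1 = 2 := rfl
            rw [hb2, if_neg (by norm_num)]
            omega
          · have h1 : Bd p a = -1 := Bd_gt p a (by omega)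
            rw [if_neg hpa, h1]
            have hbneg : bump (-1) = -1 := rfl
            rw [hbneg, if_pos rfl]
      · rw [if_neg hm10]
        have hp : parB b = none := by unfold parB; rw [if_neg hm2, if_neg hm10]
        rw [hp] at hmain
        dsimp only at hmain
        rw [hmain, if_pos rfl]

-- ===== VERDICT (by name: the statement is the Claim_ definition above) =====
theorem a_to_b_spec : Claim_equal_a_to_b := by
  unfold Claim_equal_a_to_b
  intro a b _ hpre
  unfold Spec_a_to_b a_to_b a_to_b_alt
  have halt : bDepth b ((b - a).toNat + 1) a = Bd b a := rfl
  rw [halt]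
  rcases lt_trichotomy b a with hlt | heq | hgt
  · -- b < a : loop skipped without a match; no forward path either
    rw [aLoop, if_neg (by omega : ¬ b > a), if_neg (by omega : ¬ b = a),
        Bd_gt b a hlt]
  · -- b = a : both sides give 1
    rw [aLoop, if_neg (by omega : ¬ b > a), if_pos heq, heq, Bd_self]
    omega
  · -- a < b
    rcases hpre with ha | hb
    · rw [aLoop_pos a ha (b.natAbs + 1) b 0 hgt (by omega)]
      by_cases h : Bd b a = -1
      · rw [if_pos h, h]
      · rw [if_neg h]; omega
    · rw [aLoop_neg a (b.natAbs + 1) b 0 hgt hb (by omega)]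
      rw [Bd_eq b a (by omega), if_neg (by omega), if_neg (by omega)]
      rfl
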